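-- pv_equiv track=rewrite | github.com/kamilawarzecha/basic-python | .venv/zadanie2.py | name_sorter
-- ===== SOURCE A (Python) =====
-- def name_sorter(names):
--     sorted_names = {"female" : [], "male" : []}
--     for name in names:
--         if name[-1] == "a":
--             sorted_names["female"].append(name)
--             sorted_names["female"].sort()
--         else:
--             sorted_names["male"].append(name)
--             sorted_names["male"].sort()
--     return sorted_names
-- ===== SOURCE B (Python) =====
-- def name_sorter(names):
--     s = sorted(names)
--     return {"female": [n for n in s if n[-1] == "a"],
--             "male": [n for n in s if n[-1] != "a"]}
-- ===== Notes on version B (the rewrite author's own statement) =====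
-- stated objective: simpler
-- what changed: One global sort followed by a stable partition into the two groups, instead of re-sorting the growing group list after every single append.
import Mathlib
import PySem

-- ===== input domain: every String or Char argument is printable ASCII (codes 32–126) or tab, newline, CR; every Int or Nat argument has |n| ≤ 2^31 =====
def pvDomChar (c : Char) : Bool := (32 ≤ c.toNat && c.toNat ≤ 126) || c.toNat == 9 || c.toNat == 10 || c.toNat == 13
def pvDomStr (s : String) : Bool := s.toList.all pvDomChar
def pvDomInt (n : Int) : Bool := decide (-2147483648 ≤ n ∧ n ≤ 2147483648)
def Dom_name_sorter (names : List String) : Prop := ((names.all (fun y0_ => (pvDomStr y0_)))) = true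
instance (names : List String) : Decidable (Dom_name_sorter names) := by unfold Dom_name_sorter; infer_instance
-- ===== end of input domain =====

-- B replaces A's append-then-re-sort-per-element loop by one global sort plus a stable partition (simpler, and asymptotically cheaper).

-- ===== PORT A =====
-- the dict has exactly the two fixed keys "female"/"male"; it is carried as the pair of their list values
def name_sorter (names : List String) : List (String × List String) :=
  let p := names.foldl (fun (st : List String × List String) name =>
    if PySem.Str.pyGet? name (-1) == some 'a' then
      (PySem.List.sorted (st.1 ++ [name]) (fun x => x) false, st.2)
    else
      (st.1, PySem.List.sorted (st.2 ++ [name]) (fun x => x) false)) ([], [])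
  [("female", p.1), ("male", p.2)]

-- ===== PORT B =====
def name_sorter_alt (names : List String) : List (String × List String) :=
  let s := PySem.List.sorted names (fun x => x) false
  [("female", s.filter (fun n => PySem.Str.pyGet? n (-1) == some 'a')),
   ("male", s.filter (fun n => !(PySem.Str.pyGet? n (-1) == some 'a')))]

-- ===== PRECONDITION & SPEC =====
-- Pre_ excludes lists containing the empty string, on which name[-1] raises IndexError in A (and in B).
def Pre_name_sorter (names : List String) : Prop := "" ∉ names
instance (names : List String) : Decidable (Pre_name_sorter names) := by unfold Pre_name_sorter; infer_instance
def pvWitness_name_sorter : List String := ["Eva", "Bob", "Anna"]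

def Spec_name_sorter (names : List String) (out : List (String × List String)) : Prop := out = name_sorter_alt names
instance (names : List String) (out : List (String × List String)) : Decidable (Spec_name_sorter names out) := by unfold Spec_name_sorter; infer_instance

-- ===== CLAIM (what is proved, stated in full; the proofs are below) =====
def Claim_equal_name_sorter : Prop := ∀ (names : List String), Dom_name_sorter names → Pre_name_sorter names → Spec_name_sorter names (name_sorter names)

-- ===== LEMMAS AND PROOFS =====

-- sorting is invariant under permuting its argument (identity key)
theorem sorted_sorted_append (l r : List String) :
    PySem.List.sorted (PySem.List.sorted l (fun x => x) false ++ r) (fun x => x) false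
      = PySem.List.sorted (l ++ r) (fun x => x) false := by
  apply PySem.List.sorted_eq_sorted_of_perm _ _ _ (fun a b h => h)
  exact (PySem.List.sorted_perm l (fun x => x) false).append_right r

-- A's loop invariant: from a pair of sorted states, the fold produces the sort of the
-- underlying lists extended by the matching filters.
theorem name_sorter_fold (names : List String) (f m : List String) :
    names.foldl (fun (st : List String × List String) name =>
      if PySem.Str.pyGet? name (-1) == some 'a' then
        (PySem.List.sorted (st.1 ++ [name]) (fun x => x) false, st.2)
      else
        (st.1, PySem.List.sorted (st.2 ++ [name]) (fun x => x) false))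
      (PySem.List.sorted f (fun x => x) false, PySem.List.sorted m (fun x => x) false)
    = (PySem.List.sorted (f ++ names.filter (fun n => PySem.Str.pyGet? n (-1) == some 'a')) (fun x => x) false,
       PySem.List.sorted (m ++ names.filter (fun n => !(PySem.Str.pyGet? n (-1) == some 'a'))) (fun x => x) false) := by
  induction names generalizing f m with
  | nil => simp
  | cons x xs ih =>
      by_cases h : (PySem.Str.pyGet? x (-1) == some 'a') = true
      · simp only [List.foldl_cons, h, if_pos, List.filter_cons, Bool.not_true, if_neg,
          Bool.false_eq_true, not_false_iff]
        rw [sorted_sorted_append, ih (f ++ [x]) m]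
        simp
      · simp only [List.foldl_cons, h, if_neg, List.filter_cons, Bool.not_eq_true', if_pos,
          Bool.false_eq_true, not_false_iff]
        rw [sorted_sorted_append, ih f (m ++ [x])]
        simp

-- stable global sort then filter = sort of the filter
theorem filter_sorted (p : String → Bool) (names : List String) :
    (PySem.List.sorted names (fun x => x) false).filter p
      = PySem.List.sorted (names.filter p) (fun x => x) false := by
  exact (PySem.List.sorted_id_eq_of_perm_of_pairwise (names.filter p)
    ((PySem.List.sorted names (fun x => x) false).filter p)
    ((PySem.List.sorted_perm names (fun x => x) false).filter p)
    ((PySem.List.sorted_pairwise names (fun x => x)).filter p)).symm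

theorem name_sorter_spec : Claim_equal_name_sorter := by
  intro names _ _
  unfold Spec_name_sorter
  show name_sorter names = name_sorter_alt names
  simp only [name_sorter, name_sorter_alt]
  have h := name_sorter_fold names [] []
  rw [show PySem.List.sorted ([] : List String) (fun x => x) false = [] from rfl,
      List.nil_append, List.nil_append] at h
  rw [h, filter_sorted, filter_sorted]
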